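-- pv_equiv track=rewrite | github.com/hugechuanqi/Algorithms-and-Data-Structures | Interview/pratical_interview/hw_04、报文转义.py | transform
-- ===== SOURCE A (Python) =====
-- def transform(length, s):
--     res = []
--     for elem in s:
--         if elem == 'A':
--             res.append('12')
--             res.append('34')
--             length += 1
--         elif elem == 'B':
--             res.append('AB')
--             res.append('CD')
--             length += 1
--         else:
--             res.append(elem)
--     length = hex(length)[2:]
--     res.insert(0, str(length))
--     return ' '.join(res)
-- ===== SOURCE B (Python) =====
-- def transform(length, s):
--     # length adjustment computed in closed form; output assembled back-to-front:
--     # pieces and explicit separators appended in reverse order, hex prefix last,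
--     # then one ''.join over the reversed parts list
--     new_len = length + s.count('A') + s.count('B')
--     parts = []
--     for elem in reversed(s):
--         parts.append('12 34' if elem == 'A' else 'AB CD' if elem == 'B' else elem)
--         parts.append(' ')
--     parts.append(hex(new_len)[2:])
--     return ''.join(reversed(parts))
-- ===== Notes on version B (the rewrite author's own statement) =====
-- stated objective: alternative
-- what changed: Instead of A's forward loop threading a token list and a running length and joining with ' ' after inserting the hex prefix at the front, B computes the adjusted length in closed form from the two element counts and assembles the output back-to-front: pieces with explicit separator strings appended in reverse order, the hex prefix appended last, then one ''.join over the reversed parts list.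
import Mathlib
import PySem

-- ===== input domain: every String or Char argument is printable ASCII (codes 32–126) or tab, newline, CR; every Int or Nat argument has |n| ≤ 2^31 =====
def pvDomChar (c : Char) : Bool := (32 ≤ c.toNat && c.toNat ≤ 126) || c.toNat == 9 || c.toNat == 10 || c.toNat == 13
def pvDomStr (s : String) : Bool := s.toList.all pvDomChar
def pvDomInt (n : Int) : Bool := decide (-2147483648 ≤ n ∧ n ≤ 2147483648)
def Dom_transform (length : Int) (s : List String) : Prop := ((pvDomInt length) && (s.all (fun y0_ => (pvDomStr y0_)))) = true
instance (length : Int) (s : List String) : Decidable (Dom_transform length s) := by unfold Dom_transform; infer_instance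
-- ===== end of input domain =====

-- B computes the adjusted length in closed form from two element counts and assembles the
-- output back-to-front (pieces with explicit separators in reverse order, hex prefix last,
-- one ''.join of the reversed parts), instead of A's forward loop threading a result list
-- and a running length; same cost.

-- shared helper: Python's hex(n)[2:] — hex(n) is '0x<lowercase digits>' for n ≥ 0 and
-- '-0x<digits>' for n < 0, so [2:] drops '0x' resp. '-0'; exact on all ints.
def pvHexDigit (d : Nat) : Char := if d < 10 then Char.ofNat (48 + d) else Char.ofNat (87 + d)

def pvHexAux : Nat → List Char
  | 0 => []
  | n + 1 => pvHexAux ((n + 1) / 16) ++ [pvHexDigit ((n + 1) % 16)]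
decreasing_by exact Nat.div_lt_self (Nat.succ_pos n) (by omega)

def pvHexNat (n : Nat) : List Char := if n = 0 then ['0'] else pvHexAux n

def pyHexDrop2 (n : Int) : String :=
  if n < 0 then String.ofList ('x' :: pvHexNat (-n).toNat) else String.ofList (pvHexNat n.toNat)

-- ===== PORT A =====
-- A's loop: res and length threaded together through one fold, then ' '.join
def transform (length : Int) (s : List String) : String :=
  let st := s.foldl (fun (acc : List String × Int) elem =>
      if elem = "A" then (acc.1 ++ ["12", "34"], acc.2 + 1)
      else if elem = "B" then (acc.1 ++ ["AB", "CD"], acc.2 + 1)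
      else (acc.1 ++ [elem], acc.2)) ([], length)
  PySem.Str.join " " (pyHexDrop2 st.2 :: st.1)

-- ===== PORT B =====
-- B: closed-form length from the two counts; parts appended back-to-front
-- (piece then separator per element, hex prefix last), one ''.join of the reversed list
def transform_alt (length : Int) (s : List String) : String :=
  let newLen : Int := length + (s.count "A" : Nat) + (s.count "B" : Nat)
  let parts := s.reverse.foldl (fun parts elem =>
      parts ++ [if elem = "A" then "12 34" else if elem = "B" then "AB CD" else elem, " "]) []
  let parts2 := parts ++ [pyHexDrop2 newLen]
  PySem.Str.join "" parts2.reverse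

-- ===== PRECONDITION & SPEC =====
def Spec_transform (length : Int) (s : List String) (out : String) : Prop := out = transform_alt length s
instance (length : Int) (s : List String) (out : String) : Decidable (Spec_transform length s out) := by unfold Spec_transform; infer_instance

-- ===== CLAIM (what is proved, stated in full; the proofs are below) =====
def Claim_equal_transform : Prop := ∀ (length : Int) (s : List String), Dom_transform length s → Spec_transform length s (transform length s)

-- ===== LEMMAS AND PROOFS =====
-- proof-only helpers: the tokens an element contributes (A side) and its merged piece (B side)
def pieceList (e : String) : List String :=
  if e = "A" then ["12", "34"] else if e = "B" then ["AB", "CD"] else [e]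

def pieceStr (e : String) : String :=
  if e = "A" then "12 34" else if e = "B" then "AB CD" else e

lemma countP_eq_counts (s : List String) :
    (s.countP (fun e => e == "A" || e == "B") : Int) = (s.count "A" : Nat) + (s.count "B" : Nat) := by
  induction s with
  | nil => simp
  | cons hd tl ih =>
    by_cases hA : hd = "A"
    · simp [hA] at *; omega
    · by_cases hB : hd = "B"
      · simp [hB] at *; omega
      · simp [hA, hB,
          show (hd == "A") = false by simpa using hA,
          show (hd == "B") = false by simpa using hB] at *; omega

lemma transform_fold_eq (s : List String) : ∀ (acc : List String) (len : Int),
    s.foldl (fun (acc : List String × Int) elem =>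
      if elem = "A" then (acc.1 ++ ["12", "34"], acc.2 + 1)
      else if elem = "B" then (acc.1 ++ ["AB", "CD"], acc.2 + 1)
      else (acc.1 ++ [elem], acc.2)) (acc, len)
    = (acc ++ s.flatMap pieceList,
       len + ((s.countP (fun e => e == "A" || e == "B") : Nat) : Int)) := by
  induction s with
  | nil => intro acc len; simp
  | cons hd tl ih =>
    intro acc len
    by_cases hA : hd = "A"
    · simp [hA, pieceList, List.foldl_cons, ih]; omega
    · by_cases hB : hd = "B"
      · simp [hB, pieceList, List.foldl_cons, ih]; omega
      · simp [hA, hB, pieceList, List.foldl_cons, ih]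

lemma join_empty_sep : ∀ (l : List (List Char)), PySem.Chars.join [] l = l.flatten
  | [] => by simp [PySem.Chars.join_nil]
  | [p] => by simp [PySem.Chars.join_singleton]
  | p :: q :: r => by
    rw [PySem.Chars.join_cons_cons, join_empty_sep (q :: r)]; simp

lemma join_eq_seps (s : List String) : ∀ (cs : List Char),
    PySem.Chars.join [' '] (cs :: (s.flatMap pieceList).map String.toList)
      = cs ++ ((s.flatMap (fun e => [" ", pieceStr e])).map String.toList).flatten := by
  induction s with
  | nil => intro cs; simp [PySem.Chars.join_singleton]
  | cons hd tl ih =>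
    intro cs
    by_cases hA : hd = "A"
    · simp [hA, pieceList, pieceStr, PySem.Chars.join_cons_cons, ih]
    · by_cases hB : hd = "B"
      · simp [hB, pieceList, pieceStr, PySem.Chars.join_cons_cons, ih,
          show ¬ ("B" : String) = "A" by decide]
      · simp [pieceList, pieceStr, PySem.Chars.join_cons_cons, ih, hA, hB]

-- ===== VERDICT (by name: the statement is the Claim_ definition above) =====
theorem transform_spec : Claim_equal_transform := by
  intro length s _
  unfold Spec_transform transform transform_alt
  rw [transform_fold_eq, countP_eq_counts]
  rw [← String.toList_inj]
  rw [PySem.List.foldl_append_eq_flatMap]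
  rw [Int.add_assoc]
  have hrev : ((List.nil ++ s.reverse.flatMap (fun elem =>
        [if elem = "A" then "12 34" else if elem = "B" then "AB CD" else elem, " "]))
        ++ [pyHexDrop2 (length + ((s.count "A" : Nat) + (s.count "B" : Nat)))]).reverse
      = pyHexDrop2 (length + ((s.count "A" : Nat) + (s.count "B" : Nat)))
        :: s.flatMap (fun e => [" ", pieceStr e]) := by
    simp [List.reverse_flatMap, pieceStr, Function.comp_def]
  dsimp only
  rw [hrev]
  simp [PySem.Str.toList_join, join_eq_seps, join_empty_sep]
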